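-- pv_equiv track=rewrite | github.com/beforethesurge/ticketforge | src/ticketforge.py | get_template_fields
-- ===== SOURCE A (Python) =====
-- def get_template_fields(template_text):
--     """Extract input fields from template text without using regex."""
--     fields = []
--     start = 0
--
--     while True:
--         start = template_text.find('[', start)
--         if start == -1:
--             break
--         end = template_text.find(']', start)
--         if end == -1:
--             break
--         fields.append(template_text[start + 1:end])
--         start = end + 1
--
--     return fields
-- ===== SOURCE B (Python) =====
-- def get_template_fields(template_text):
--     """Extract input fields from template text without using regex."""
--     fields = []
--     inside = False
--     buf = []
--     for ch in template_text:
--         if ch == '[' and not inside: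
--             inside = True
--             buf = []
--         elif ch == ']' and inside:
--             fields.append(''.join(buf))
--             inside = False
--         elif inside:
--             buf.append(ch)
--     return fields
-- ===== Notes on version B (the rewrite author's own statement) =====
-- stated objective: alternative
-- what changed: Replaced the find()-based index-jumping while loop with a single character-by-character scan maintaining an inside-brackets flag and a character buffer.
import Mathlib
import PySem

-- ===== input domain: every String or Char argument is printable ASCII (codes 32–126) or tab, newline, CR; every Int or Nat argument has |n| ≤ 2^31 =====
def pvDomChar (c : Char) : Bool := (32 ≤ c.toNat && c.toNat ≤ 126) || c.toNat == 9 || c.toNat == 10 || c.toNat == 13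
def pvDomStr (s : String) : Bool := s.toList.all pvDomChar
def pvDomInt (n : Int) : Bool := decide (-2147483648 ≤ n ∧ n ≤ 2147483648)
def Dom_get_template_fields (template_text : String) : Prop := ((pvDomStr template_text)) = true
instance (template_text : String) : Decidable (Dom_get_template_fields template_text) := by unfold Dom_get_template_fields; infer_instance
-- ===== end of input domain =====

-- B replaces A's find()-based index-jumping loop by a single character scan with an
-- inside-brackets flag and a buffer (alternative decomposition, same asymptotic cost).

-- ===== PORT A =====
-- A's while-loop: start = find('[', start); end = find(']', start); append slice; start = end + 1.
-- Fuel only makes the recursion total; length+1 iterations always suffice (start strictly increases).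
def pvLoopA (s : List Char) (fields : List String) (start : Int) : Nat → List String
  | 0 => fields
  | fuel + 1 =>
    if PySem.Chars.findFrom s ['['] start = -1 then fields
    else if PySem.Chars.findFrom s [']'] (PySem.Chars.findFrom s ['['] start) = -1 then fields
    else
      pvLoopA s
        (fields ++ [String.ofList (PySem.Chars.slice s
          (some (PySem.Chars.findFrom s ['['] start + 1))
          (some (PySem.Chars.findFrom s [']'] (PySem.Chars.findFrom s ['['] start))))])
        (PySem.Chars.findFrom s [']'] (PySem.Chars.findFrom s ['['] start) + 1) fuel

def get_template_fields (template_text : String) : List String :=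
  pvLoopA template_text.toList [] 0 (template_text.toList.length + 1)

-- ===== PORT B =====
-- Source B's loop body: state (fields, inside, buf), one step per character.
def pvStepB (st : List String × Bool × List Char) (c : Char) : List String × Bool × List Char :=
  if c = '[' ∧ st.2.1 = false then (st.1, true, [])
  else if c = ']' ∧ st.2.1 = true then (st.1 ++ [String.ofList st.2.2], false, st.2.2)
  else if st.2.1 = true then (st.1, true, st.2.2 ++ [c])
  else st

def get_template_fields_alt (template_text : String) : List String :=
  (template_text.toList.foldl pvStepB ([], false, [])).1

-- ===== PRECONDITION & SPEC =====
def Spec_get_template_fields (template_text : String) (out : List String) : Prop := out = get_template_fields_alt template_text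
instance (template_text : String) (out : List String) : Decidable (Spec_get_template_fields template_text out) := by unfold Spec_get_template_fields; infer_instance

-- ===== CLAIM (what is proved, stated in full; the proofs are below) =====
def Claim_equal_get_template_fields : Prop := ∀ (template_text : String), Dom_get_template_fields template_text → Spec_get_template_fields template_text (get_template_fields template_text)

-- ===== LEMMAS AND PROOFS =====

-- scanning characters other than '[' while outside brackets changes nothing
lemma foldl_stepB_no_lbrack (l : List Char) (h : '[' ∉ l) (f : List String) (b : List Char) :
    List.foldl pvStepB (f, false, b) l = (f, false, b) := by
  induction l with
  | nil => rfl
  | cons c t ih =>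
    have hc : c ≠ '[' := fun hc => h (hc ▸ List.mem_cons_self)
    have hstep : pvStepB (f, false, b) c = (f, false, b) := by
      simp [pvStepB, hc]
    rw [List.foldl_cons, hstep, ih (fun hm => h (List.mem_cons_of_mem _ hm))]

-- scanning characters other than ']' while inside brackets only extends the buffer
lemma foldl_stepB_no_rbrack (l : List Char) (h : ']' ∉ l) (f : List String) (b : List Char) :
    List.foldl pvStepB (f, true, b) l = (f, true, b ++ l) := by
  induction l generalizing b with
  | nil => simp
  | cons c t ih =>
    have hc : c ≠ ']' := fun hc => h (hc ▸ List.mem_cons_self)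
    have hstep : pvStepB (f, true, b) c = (f, true, b ++ [c]) := by
      by_cases h1 : c = '['
      · simp [pvStepB, h1]
      · simp [pvStepB, h1, hc]
    rw [List.foldl_cons, hstep, ih (fun hm => h (List.mem_cons_of_mem _ hm))]
    simp

lemma prefix_singleton_iff (l : List Char) (c : Char) (i : Nat) (h : i < l.length) :
    [c] <+: l.drop i ↔ l[i] = c := by
  rw [← List.getElem_cons_drop h, List.cons_prefix_cons]
  simp [eq_comm]

lemma notMem_take_of_no_prefix (l : List Char) (c : Char) (m : Nat)
    (h : ∀ i < m, ¬ [c] <+: l.drop i) : c ∉ l.take m := by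
  intro hmem
  obtain ⟨i, hi, hget⟩ := List.mem_iff_getElem.mp hmem
  have him : i < m := by simp [List.length_take] at hi; omega
  have hlen : i < l.length := by simp [List.length_take] at hi; omega
  have hg : l[i] = c := by simpa using hget
  exact h i him ((prefix_singleton_iff l c i hlen).mpr hg)

-- the main invariant: A's loop from position `start` equals B's scan of the remaining suffix
lemma loopA_eq_scan (fuel : Nat) : ∀ (s : List Char) (start : Nat) (f : List String) (b : List Char),
    start ≤ s.length → s.length - start < fuel →
    pvLoopA s f (start : Int) fuel = (List.foldl pvStepB (f, false, b) (s.drop start)).1 := by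
  induction fuel with
  | zero => intro s start f b _ h; omega
  | succ n ih =>
    intro s start f b hle hfuel
    set l := s.drop start with hl
    have hll : l.length = s.length - start := by simp [hl]
    rw [pvLoopA]
    rw [PySem.Chars.findFrom_natCast s ['['] start hle, ← hl]
    by_cases hj : PySem.Chars.find l ['['] = -1
    · -- no '[' in the remaining text: both return `f`
      have hnomem : '[' ∉ l := by
        rw [PySem.Chars.find_eq_neg_one_iff] at hj
        exact fun hm => hj ((List.singleton_infix_iff _ _).mpr hm)
      rw [if_pos hj, foldl_stepB_no_lbrack l hnomem f b]
      simp
    · have hj0 : 0 ≤ PySem.Chars.find l ['['] := by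
        have := PySem.Chars.neg_one_le_find l ['[']
        omega
      obtain ⟨hpre, hmin⟩ := PySem.Chars.find_spec hj0
      set J := (PySem.Chars.find l ['[']).toNat with hJ
      have hJlt : J < l.length := by
        rcases hpre with ⟨t, ht⟩
        have hpos : (l.drop J).length > 0 := by rw [← ht]; simp
        simp at hpos; omega
      have hJc : l[J] = '[' := (prefix_singleton_iff l '[' J hJlt).mp hpre
      have hfind : PySem.Chars.find l ['['] = (J : Int) := by omega
      rw [if_neg hj, hfind]
      have hne : ¬ ((start : Int) + (J : Int) = -1) := by omega
      rw [if_neg hne]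
      have hcast : (start : Int) + (J : Int) = ((start + J : Nat) : Int) := by push_cast; ring
      rw [hcast, PySem.Chars.findFrom_natCast s [']'] (start + J) (by omega)]
      have hdropJ : s.drop (start + J) = l.drop J := by
        rw [hl, List.drop_drop]
      rw [hdropJ]
      by_cases hm : PySem.Chars.find (l.drop J) [']'] = -1
      · -- '[' found but no closing ']': A stops; B ends the scan inside brackets — both give `f`
        have hnomem : ']' ∉ l.drop J := by
          rw [PySem.Chars.find_eq_neg_one_iff] at hm
          exact fun hmem => hm ((List.singleton_infix_iff _ _).mpr hmem)
        rw [if_pos hm]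
        have hsplit : l = l.take J ++ ('[' :: l.drop (J + 1)) := by
          conv_lhs => rw [← List.take_append_drop J l]
          rw [← List.getElem_cons_drop hJlt, hJc]
        rw [hsplit, List.foldl_append,
          foldl_stepB_no_lbrack _ (notMem_take_of_no_prefix l '[' J hmin) f b,
          List.foldl_cons]
        have hstep : pvStepB (f, false, b) '[' = (f, true, []) := by simp [pvStepB]
        rw [hstep, foldl_stepB_no_rbrack _ (fun hmem => hnomem
          (by rw [← List.getElem_cons_drop hJlt, hJc]; exact List.mem_cons_of_mem _ hmem)) f []]
        simp
      · have hm0 : 0 ≤ PySem.Chars.find (l.drop J) [']'] := by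
          have := PySem.Chars.neg_one_le_find (l.drop J) [']']
          omega
        obtain ⟨hpreM, hminM⟩ := PySem.Chars.find_spec hm0
        set M := (PySem.Chars.find (l.drop J) [']']).toNat with hM
        have hMlt : M < (l.drop J).length := by
          rcases hpreM with ⟨t, ht⟩
          have hpos : ((l.drop J).drop M).length > 0 := by rw [← ht]; simp
          simp only [List.length_drop] at hpos ⊢
          omega
        have hMc : (l.drop J)[M] = ']' := (prefix_singleton_iff _ ']' M hMlt).mp hpreM
        have hM1 : 1 ≤ M := by
          by_contra h0
          have hM0 : M = 0 := by omega
          rcases hpre with ⟨t, ht⟩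
          obtain ⟨t2, ht2⟩ := hpreM
          rw [hM0, List.drop_zero] at ht2
          have heads := ht.trans ht2.symm
          rw [List.singleton_append, List.singleton_append] at heads
          injection heads with h4 _
          exact absurd h4 (by decide)
        have hld : (l.drop J).length = l.length - J := by simp
        have hJM : J + M < l.length := by omega
        have hfindM : PySem.Chars.find (l.drop J) [']'] = (M : Int) := by omega
        rw [if_neg hm, hfindM]
        have hne2 : ¬ (((start + J : Nat) : Int) + (M : Int) = -1) := by push_cast; omega
        rw [if_neg hne2]
        -- the extracted field: characters strictly between '[' and ']'
        set mid := (l.drop (J + 1)).take (M - 1) with hmid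
        have hmidlen : mid.length = M - 1 := by
          simp [hmid, List.length_take]
          omega
        have hslice : PySem.Chars.slice s (some (((start + J : Nat) : Int) + 1)) (some (((start + J : Nat) : Int) + (M : Int))) = mid := by
          rw [PySem.Chars.slice_eq_listSlice]
          have h1 : ((start + J : Nat) : Int) + 1 = ((start + J + 1 : Nat) : Int) := by push_cast; ring
          have h2 : ((start + J : Nat) : Int) + (M : Int) = ((start + J + M : Nat) : Int) := by push_cast; ring
          rw [h1, h2, PySem.List.slice_natCast]
          rw [hmid, hl, List.drop_drop]
          congr 1
          omega
        rw [hslice]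
        have hcast2 : ((start + J : Nat) : Int) + (M : Int) + 1 = ((start + J + M + 1 : Nat) : Int) := by push_cast; ring
        rw [hcast2, ih s (start + J + M + 1) (f ++ [String.ofList mid]) mid (by omega) (by omega)]
        -- decompose B's scan of l: prefix without '[', then '[', the field, ']', and the rest
        have hdropJ1 : (l.drop (J + 1)).drop (M - 1) = l.drop (J + M) := by
          rw [List.drop_drop]; congr 1; omega
        have hgetq : l[J + M]? = some ']' := by
          rw [← List.getElem?_drop]
          rw [List.getElem?_eq_getElem hMlt, hMc]
        have hMc' : l[J + M]'hJM = ']' := by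
          have hq := List.getElem?_eq_getElem hJM
          rw [hgetq] at hq
          exact (Option.some.inj hq).symm
        have hrest : l.drop (J + M) = ']' :: s.drop (start + J + M + 1) := by
          rw [← List.getElem_cons_drop hJM]
          rw [hMc']
          congr 1
          rw [hl, List.drop_drop]
          congr 1; omega
        have htailJ : l.drop J = '[' :: (mid ++ ']' :: s.drop (start + J + M + 1)) := by
          rw [← List.getElem_cons_drop hJlt, hJc]
          congr 1
          conv_lhs => rw [← List.take_append_drop (M - 1) (l.drop (J + 1))]
          rw [hdropJ1, hrest]
        have hsplit : l = l.take J ++ ('[' :: (mid ++ ']' :: s.drop (start + J + M + 1))) := by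
          conv_lhs => rw [← List.take_append_drop J l]
          rw [htailJ]
        rw [hsplit, List.foldl_append,
          foldl_stepB_no_lbrack _ (notMem_take_of_no_prefix l '[' J hmin) f b,
          List.foldl_cons]
        have hstep : pvStepB (f, false, b) '[' = (f, true, []) := by simp [pvStepB]
        rw [hstep, List.foldl_append]
        have hnomid : ']' ∉ mid := by
          intro hmem
          have htake : (l.drop J).take M = '[' :: mid := by
            rw [htailJ]
            have hMeq : M = (M - 1) + 1 := by omega
            rw [hMeq, List.take_succ_cons]
            congr 1
            rw [List.take_append_of_le_length (by omega)]
            exact List.take_of_length_le (by omega)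
          exact notMem_take_of_no_prefix (l.drop J) ']' M hminM
            (by rw [htake]; exact List.mem_cons_of_mem _ hmem)
        rw [foldl_stepB_no_rbrack mid hnomid f [], List.foldl_cons]
        have hstep2 : pvStepB (f, true, [] ++ mid) ']' = (f ++ [String.ofList ([] ++ mid)], false, [] ++ mid) := by
          simp [pvStepB]
        rw [hstep2]
        simp

-- ===== VERDICT (by name: the statement is the Claim_ definition above) =====
theorem get_template_fields_spec : Claim_equal_get_template_fields := by
  intro t _
  unfold Spec_get_template_fields get_template_fields get_template_fields_alt
  have h := loopA_eq_scan (t.toList.length + 1) t.toList 0 [] [] (by omega) (by omega)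
  simpa using h
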